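-- pv_equiv track=rewrite | github.com/algo-cancer/ImmunoTyper-SR | src/call_variants.py | remove_periods
-- ===== SOURCE A (Python) =====
-- def remove_periods(seq):
-- 	# returns (seq with '.' removed, array of len(result) where each pos maps to corresponding pos in original seq)
-- 	forward_map = []
-- 	backward_map = []
-- 	result = []
-- 	seq = seq.replace('-', '.')
-- 	for index, char in enumerate(seq):
-- 		if char != '.':
-- 			result.append(char)
-- 			backward_map.append(index)
-- 			forward_map.append(len(result)-1)
-- 		else:
-- 			forward_map.append(0 if not forward_map else (forward_map[-1]+1 if seq[index-1] != '.' else forward_map[-1]))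
-- 			# print index
-- 			# print seq[:index+1]
-- 			# print forward_map
-- 			# print result
-- 	return (''.join(result), forward_map, backward_map)
-- ===== SOURCE B (Python) =====
-- def remove_periods(seq):
--     # returns (seq with '.' removed, array of len(result) where each pos maps to corresponding pos in original seq)
--     seq = seq.replace('-', '.')
--     result = ''.join(ch for ch in seq if ch != '.')
--     backward_map = [i for i, ch in enumerate(seq) if ch != '.']
--     # forward_map[i] = number of non-period characters in seq[:i]
--     forward_map = []
--     count = 0
--     for ch in seq:
--         forward_map.append(count)
--         if ch != '.':
--             count += 1
--     return (result, forward_map, backward_map)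
-- ===== Notes on version B (the rewrite author's own statement) =====
-- stated objective: simpler
-- what changed: Replaces the single loop with the self-referential forward_map[-1]/seq[index-1] look-back by three independent constructions: a filter for the result string, an enumerate-filter comprehension for backward_map, and a running prefix counter for forward_map (forward_map[i] is just the count of non-period chars in seq[:i]).
import Mathlib
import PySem

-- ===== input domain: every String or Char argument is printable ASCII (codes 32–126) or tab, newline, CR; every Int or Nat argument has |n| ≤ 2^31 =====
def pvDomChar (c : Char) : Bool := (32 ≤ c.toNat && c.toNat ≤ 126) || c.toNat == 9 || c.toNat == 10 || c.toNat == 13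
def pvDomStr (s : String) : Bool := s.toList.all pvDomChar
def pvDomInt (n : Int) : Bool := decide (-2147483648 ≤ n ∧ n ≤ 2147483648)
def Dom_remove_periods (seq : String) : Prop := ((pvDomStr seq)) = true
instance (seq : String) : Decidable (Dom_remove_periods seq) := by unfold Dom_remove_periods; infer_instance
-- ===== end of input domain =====

-- B replaces A's single loop with its forward_map[-1]/seq[index-1] look-back by three
-- independent constructions (filter, enumerate-filter, running prefix counter); objective: simpler.

-- ===== PORT A =====
-- the for-loop of A, as structural recursion over the remaining characters;
-- `s` is the whole (period-substituted) string, needed for the seq[index-1] look-back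
def pvLoopA (s : List Char) (rest : List Char) (index : Int)
    (res : List Char) (fm bm : List Int) : List Char × List Int × List Int :=
  match rest with
  | [] => (res, fm, bm)
  | char :: t =>
    if char != '.' then
      pvLoopA s t (index + 1) (res ++ [char])
        (fm ++ [((res ++ [char]).length : Int) - 1]) (bm ++ [index])
    else
      pvLoopA s t (index + 1) res
        (fm ++ [if fm = [] then 0
                else (if PySem.List.pyGet? s (index - 1) ≠ some '.'
                      then (PySem.List.pyGet? fm (-1)).getD 0 + 1
                      else (PySem.List.pyGet? fm (-1)).getD 0)]) bm

def remove_periods (seq : String) : String × List Int × List Int :=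
  let s := (PySem.Str.replace seq "-" ".").toList
  let out := pvLoopA s s 0 [] [] []
  (String.ofList out.1, out.2.1, out.2.2)

-- ===== PORT B =====
-- B's forward_map loop: append the running count, then bump it on a non-period char
def pvPrefixCounts (rest : List Char) (fm : List Int) (count : Int) : List Int :=
  match rest with
  | [] => fm
  | ch :: t => pvPrefixCounts t (fm ++ [count]) (if ch != '.' then count + 1 else count)

def remove_periods_alt (seq : String) : String × List Int × List Int :=
  let s := (PySem.Str.replace seq "-" ".").toList
  let result := s.filter (fun ch => ch != '.')
  let backward := ((PySem.List.enumerate s 0).filter (fun p => p.2 != '.')).map (fun p => p.1)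
  let forward := pvPrefixCounts s [] 0
  (String.ofList result, forward, backward)

-- ===== PRECONDITION & SPEC =====
def Spec_remove_periods (seq : String) (out : String × List Int × List Int) : Prop := out = remove_periods_alt seq
instance (seq : String) (out : String × List Int × List Int) : Decidable (Spec_remove_periods seq out) := by unfold Spec_remove_periods; infer_instance

-- ===== CLAIM (what is proved, stated in full; the proofs are below) =====
def Claim_equal_remove_periods : Prop := ∀ (seq : String), Dom_remove_periods seq → Spec_remove_periods seq (remove_periods seq)

-- ===== LEMMAS AND PROOFS =====

-- closed forms of the three loop states after processing l.take n
def pvCnt (l : List Char) (n : Nat) : Int := ((l.take n).countP (fun ch => ch != '.') : Int)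
def pvF (l : List Char) (n : Nat) : List Char := (l.take n).filter (fun ch => ch != '.')
def pvM (l : List Char) (n : Nat) : List Int := (List.range n).map (fun i => pvCnt l i)
def pvB (l : List Char) (n : Nat) : List Int :=
  (((PySem.List.enumerate l 0).take n).filter (fun p => p.2 != '.')).map (fun p => p.1)

lemma pvCnt_succ (l : List Char) (n : Nat) (h : n < l.length) :
    pvCnt l (n + 1) = pvCnt l n + (if l[n] != '.' then 1 else 0) := by
  unfold pvCnt
  rw [List.take_add_one, List.getElem?_eq_getElem h]
  simp only [Option.toList_some, List.countP_append, List.countP_cons, List.countP_nil]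
  push_cast
  split <;> simp

lemma pvM_succ (l : List Char) (n : Nat) :
    pvM l (n + 1) = pvM l n ++ [pvCnt l n] := by
  simp [pvM, List.range_succ]

lemma pvF_succ (l : List Char) (n : Nat) (h : n < l.length) :
    pvF l (n + 1) = pvF l n ++ (if l[n] != '.' then [l[n]] else []) := by
  unfold pvF
  rw [List.take_add_one, List.getElem?_eq_getElem h, Option.toList_some, List.filter_append]
  by_cases hch : l[n] = '.'
  · rw [if_neg (by simp [hch])]
    simp [hch]
  · rw [if_pos (by simp [hch])]
    simp [hch]

lemma pvB_succ (l : List Char) (n : Nat) (h : n < l.length) :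
    pvB l (n + 1) = pvB l n ++ (if l[n] != '.' then [(n : Int)] else []) := by
  have hlen : n < (PySem.List.enumerate l 0).length := by
    simpa [PySem.List.length_enumerate] using h
  unfold pvB
  rw [List.take_add_one, List.getElem?_eq_getElem hlen]
  by_cases hch : l[n] = '.' <;>
    simp [List.filter_append, PySem.List.getElem_enumerate, hch]

lemma pvLoopA_eq (l : List Char) :
    ∀ (rest : List Char) (n : Nat), rest = l.drop n → n ≤ l.length →
    pvLoopA l rest (n : Int) (pvF l n) (pvM l n) (pvB l n)
      = (pvF l l.length, pvM l l.length, pvB l l.length) := by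
  intro rest
  induction rest with
  | nil =>
    intro n hdrop hle
    have : l.length ≤ n := by
      have := congrArg List.length hdrop
      simp [List.length_drop] at this
      omega
    have hn : n = l.length := le_antisymm hle this
    subst hn
    simp [pvLoopA]
  | cons char t ih =>
    intro n hdrop hle
    have hlt : n < l.length := by
      have := congrArg List.length hdrop
      simp [List.length_drop] at this
      omega
    have hget : l[n] = char := by
      have := congrArg (·[0]?) hdrop
      simpa [List.getElem?_drop, List.getElem?_eq_getElem hlt] using this.symm
    have hdrop' : t = l.drop (n + 1) := by
      have := congrArg (List.drop 1) hdrop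
      simpa [List.drop_drop, Nat.add_comm] using this
    have hcast : (n : Int) + 1 = ((n + 1 : Nat) : Int) := by push_cast; ring
    by_cases hc : char = '.'
    · -- period branch
      have hval :
          (if pvM l n = [] then 0
           else (if PySem.List.pyGet? l ((n : Int) - 1) ≠ some '.'
                 then (PySem.List.pyGet? (pvM l n) (-1)).getD 0 + 1
                 else (PySem.List.pyGet? (pvM l n) (-1)).getD 0)) = pvCnt l n := by
        rcases Nat.eq_zero_or_pos n with h0 | hpos
        · subst h0; simp [pvM, pvCnt]
        · obtain ⟨m, hm⟩ : ∃ m, n = m + 1 := ⟨n - 1, by omega⟩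
          subst hm
          have hmlt : m < l.length := by omega
          have hempty : pvM l (m + 1) ≠ [] := by simp [pvM_succ]
          have hlast : PySem.List.pyGet? (pvM l (m + 1)) (-1) = some (pvCnt l m) := by
            rw [pvM_succ]
            exact PySem.List.pyGet?_neg_one_append_singleton _ _
          have hidx : PySem.List.pyGet? l (((m + 1 : Nat) : Int) - 1) = some l[m] := by
            have : ((m + 1 : Nat) : Int) - 1 = ((m : Nat) : Int) := by push_cast; ring
            rw [this, PySem.List.pyGet?_natCast, List.getElem?_eq_getElem hmlt]
          rw [if_neg hempty, hlast, hidx, pvCnt_succ l m hmlt]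
          by_cases hm' : l[m] = '.' <;> simp [hm']
      rw [hc] at hget ⊢
      simp only [pvLoopA, bne_self_eq_false, if_false, Bool.false_eq_true]
      rw [hval, hcast, ← pvM_succ]
      have hF : pvF l (n + 1) = pvF l n := by
        rw [pvF_succ l n hlt, hget]; simp
      have hB : pvB l (n + 1) = pvB l n := by
        rw [pvB_succ l n hlt, hget]; simp
      rw [← hF, ← hB]
      exact ih (n + 1) hdrop' (by omega)
    · -- non-period branch
      have hne : (char != '.') = true := by simp [hc]
      simp only [pvLoopA, hne, if_true]
      have hfm : ((pvF l n ++ [char]).length : Int) - 1 = pvCnt l n := by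
        simp [pvF, pvCnt, ← List.countP_eq_length_filter]
      have hF : pvF l (n + 1) = pvF l n ++ [char] := by
        rw [pvF_succ l n hlt, hget]; simp [hne]
      have hM : pvM l (n + 1) = pvM l n ++ [pvCnt l n] := pvM_succ l n
      have hB : pvB l (n + 1) = pvB l n ++ [(n : Int)] := by
        rw [pvB_succ l n hlt, hget]; simp [hne]
      rw [hfm, hcast, ← hF, ← hM, ← hB]
      exact ih (n + 1) hdrop' (by omega)

lemma pvPrefixCounts_eq :
    ∀ (rest : List Char) (fm : List Int) (c : Int),
    pvPrefixCounts rest fm c = fm ++ (List.range rest.length).map (fun i => c + pvCnt rest i) := by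
  intro rest
  induction rest with
  | nil => intro fm c; simp [pvPrefixCounts]
  | cons a t ih =>
    intro fm c
    rw [pvPrefixCounts, ih]
    rw [List.append_assoc]
    congr 1
    rw [List.length_cons, List.range_succ_eq_map, List.map_cons, List.map_map]
    have h0 : c + pvCnt (a :: t) 0 = c := by simp [pvCnt]
    have hs : ∀ i, ((fun i => c + pvCnt (a :: t) i) ∘ Nat.succ) i
        = (if a != '.' then c + 1 else c) + pvCnt t i := by
      intro i
      simp only [Function.comp, pvCnt, List.take_succ_cons, List.countP_cons]
      by_cases ha : a = '.'
      · simp [ha]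
      · simp [ha]; ring
    rw [h0, List.map_congr_left (fun i _ => hs i)]
    simp

lemma remove_periods_closed (seq : String) :
    remove_periods seq =
      (String.ofList (pvF (PySem.Str.replace seq "-" ".").toList (PySem.Str.replace seq "-" ".").toList.length),
       pvM (PySem.Str.replace seq "-" ".").toList (PySem.Str.replace seq "-" ".").toList.length,
       pvB (PySem.Str.replace seq "-" ".").toList (PySem.Str.replace seq "-" ".").toList.length) := by
  unfold remove_periods
  have h := pvLoopA_eq (PySem.Str.replace seq "-" ".").toList
      (PySem.Str.replace seq "-" ".").toList 0 (by simp) (by simp)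
  simp only [pvF, pvM, pvB, List.take_zero, List.range_zero, List.filter_nil, List.map_nil,
    Nat.cast_zero] at h ⊢
  rw [h]

-- ===== VERDICT (by name: the statement is the Claim_ definition above) =====
theorem remove_periods_spec : Claim_equal_remove_periods := by
  intro seq _
  unfold Spec_remove_periods
  rw [remove_periods_closed]
  unfold remove_periods_alt
  set l := (PySem.Str.replace seq "-" ".").toList with hl
  have hfwd : pvPrefixCounts l [] 0 = pvM l l.length := by
    rw [pvPrefixCounts_eq]
    simp [pvM]
  have hres : l.filter (fun ch => ch != '.') = pvF l l.length := by
    simp [pvF]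
  have hbwd : ((PySem.List.enumerate l 0).filter (fun p => p.2 != '.')).map (fun p => p.1)
      = pvB l l.length := by
    simp [pvB, List.take_of_length_le, PySem.List.length_enumerate]
  simp only [hfwd, hres, hbwd]
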